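-- pv_equiv track=rewrite | github.com/filizipek/womens-health-rag | scripts/extract_text.py | tags_to_fields
-- ===== SOURCE A (Python) =====
-- def tags_to_fields(tags: list[str]) -> dict:
--     # Optional helper: pull tier/source/type from tag prefixes
--     out = {"tier": None, "source": None, "type": None}
--     for t in tags or []:
--         if t.startswith("tier:"):
--             out["tier"] = t
--         elif t.startswith("source:"):
--             out["source"] = t
--         elif t.startswith("type:"):
--             out["type"] = t
--     return out
-- ===== SOURCE B (Python) =====
-- def tags_to_fields(tags: list[str]) -> dict:
--     # Field-driven: for each field key, take the last tag with that prefix (first in reversed order).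
--     return {
--         k: next((t for t in reversed(tags or []) if t.startswith(k + ":")), None)
--         for k in ("tier", "source", "type")
--     }
-- ===== Notes on version B (the rewrite author's own statement) =====
-- stated objective: alternative
-- what changed: Field-driven reorganization: instead of A's single tag-driven pass with an elif chain updating a dict, B iterates over the three field keys and for each scans the tags in reverse taking the first match (= last match), relying on the prefixes being mutually exclusive.
import Mathlib
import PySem

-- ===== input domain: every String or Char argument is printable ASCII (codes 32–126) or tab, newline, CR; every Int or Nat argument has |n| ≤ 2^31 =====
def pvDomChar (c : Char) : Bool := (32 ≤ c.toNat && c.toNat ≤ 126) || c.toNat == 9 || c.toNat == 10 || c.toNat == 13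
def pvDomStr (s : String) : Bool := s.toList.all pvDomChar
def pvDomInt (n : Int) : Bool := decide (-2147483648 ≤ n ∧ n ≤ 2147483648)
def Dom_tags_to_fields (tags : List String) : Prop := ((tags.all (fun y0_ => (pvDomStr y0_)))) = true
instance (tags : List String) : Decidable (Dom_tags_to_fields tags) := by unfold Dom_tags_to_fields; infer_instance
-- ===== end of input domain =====

-- B reorganizes A's single tag-driven elif-chain pass into a field-driven form:
-- for each of the three keys, scan the tags in reverse and take the first match (= last match).


-- ===== PORT A =====
-- A's dict has exactly the fixed keys "tier","source","type"; its state is ported as the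
-- triple of their values, rebuilt into the assoc list (insertion order) at the end.
def tags_to_fields (tags : List String) : List (String × Option String) :=
  let out :=
    tags.foldl (fun (out : Option String × Option String × Option String) t =>
      if PySem.Str.startswith t "tier:" then (some t, out.2.1, out.2.2)
      else if PySem.Str.startswith t "source:" then (out.1, some t, out.2.2)
      else if PySem.Str.startswith t "type:" then (out.1, out.2.1, some t)
      else out) (none, none, none)
  [("tier", out.1), ("source", out.2.1), ("type", out.2.2)]

-- ===== PORT B =====
def tags_to_fields_alt (tags : List String) : List (String × Option String) :=
  ["tier", "source", "type"].map (fun k =>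
    (k, tags.reverse.find? (fun t => PySem.Str.startswith t (k ++ ":"))))

-- ===== PRECONDITION & SPEC =====
def Spec_tags_to_fields (tags : List String) (out : List (String × Option String)) : Prop := out = tags_to_fields_alt tags
instance (tags : List String) (out : List (String × Option String)) : Decidable (Spec_tags_to_fields tags out) := by unfold Spec_tags_to_fields; infer_instance

-- ===== CLAIM (what is proved, stated in full; the proofs are below) =====
def Claim_equal_tags_to_fields : Prop := ∀ (tags : List String), Dom_tags_to_fields tags → Spec_tags_to_fields tags (tags_to_fields tags)

-- ===== LEMMAS AND PROOFS =====

-- The three prefixes are mutually exclusive: a tag matching one cannot match another.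
theorem sw_excl (t p q : String) (h1 : ¬ (p.toList <+: q.toList)) (h2 : ¬ (q.toList <+: p.toList))
    (hp : PySem.Str.startswith t p = true) : PySem.Str.startswith t q = false := by
  simp only [PySem.Str.startswith, PySem.Chars.startswith, Bool.eq_false_iff, ne_eq,
    List.isPrefixOf_iff_prefix] at hp ⊢
  intro hq
  rcases List.prefix_or_prefix_of_prefix hp hq with h | h
  · exact h1 h
  · exact h2 h

-- Each component of A's fold state is the last matching tag, defaulted to the initial value.
theorem foldA_components (tags : List String) (a b c : Option String) :
    tags.foldl (fun (out : Option String × Option String × Option String) t =>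
      if PySem.Str.startswith t "tier:" then (some t, out.2.1, out.2.2)
      else if PySem.Str.startswith t "source:" then (out.1, some t, out.2.2)
      else if PySem.Str.startswith t "type:" then (out.1, out.2.1, some t)
      else out) (a, b, c) =
    ((tags.reverse.find? (fun t => PySem.Str.startswith t "tier:")).or a,
     (tags.reverse.find? (fun t => PySem.Str.startswith t "source:")).or b,
     (tags.reverse.find? (fun t => PySem.Str.startswith t "type:")).or c) := by
  induction tags generalizing a b c with
  | nil => simp
  | cons t ts ih =>
    rw [List.foldl_cons]
    by_cases h1 : PySem.Str.startswith t "tier:" = true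
    · have e2 := sw_excl t "tier:" "source:" (by decide) (by decide) h1
      have e3 := sw_excl t "tier:" "type:" (by decide) (by decide) h1
      rw [if_pos h1, ih]
      simp only [List.reverse_cons, List.find?_append, List.find?_cons_of_pos,
        List.find?_cons_of_neg, List.find?_nil, h1, e2, e3, Bool.false_eq_true,
        not_false_eq_true, Option.or_assoc, Option.some_or, Option.or_none]
    · rw [if_neg h1]
      simp only [Bool.not_eq_true] at h1
      by_cases h2 : PySem.Str.startswith t "source:" = true
      · have e3 := sw_excl t "source:" "type:" (by decide) (by decide) h2
        rw [if_pos h2, ih]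
        simp only [List.reverse_cons, List.find?_append, List.find?_cons_of_pos,
          List.find?_cons_of_neg, List.find?_nil, h1, h2, e3, Bool.false_eq_true,
          not_false_eq_true, Option.or_assoc, Option.some_or, Option.or_none]
      · rw [if_neg h2]
        simp only [Bool.not_eq_true] at h2
        by_cases h3 : PySem.Str.startswith t "type:" = true
        · rw [if_pos h3, ih]
          simp only [List.reverse_cons, List.find?_append, List.find?_cons_of_pos,
            List.find?_cons_of_neg, List.find?_nil, h1, h2, h3, Bool.false_eq_true,
            not_false_eq_true, Option.or_assoc, Option.some_or, Option.or_none]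
        · rw [if_neg h3, ih]
          simp only [Bool.not_eq_true] at h3
          simp only [List.reverse_cons, List.find?_append, List.find?_cons_of_neg,
            List.find?_nil, h1, h2, h3, Bool.false_eq_true, not_false_eq_true,
            Option.or_none]

theorem tags_to_fields_eq (tags : List String) :
    tags_to_fields tags = tags_to_fields_alt tags := by
  simp only [tags_to_fields, tags_to_fields_alt, foldA_components, List.map, Option.or_none]
  rfl

-- ===== VERDICT (by name: the statement is the Claim_ definition above) =====
theorem tags_to_fields_spec : Claim_equal_tags_to_fields := by
  intro tags _
  exact tags_to_fields_eq tags
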